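-- pv_equiv track=rewrite | github.com/pappubabu200-jpg/email-verification-saas | Backend/app/services/spam_checker.py | _is_role_account
-- ===== SOURCE A (Python) =====
-- ROLE_ACCOUNT_KEYWORDS = [
--     "admin", "administrator", "postmaster", "root",
--     "abuse", "support", "helpdesk", "info", "sales",
--     "billing", "contact", "office", "team",
--     "no-reply", "noreply", "donotreply",
-- ]
--
-- def _is_role_account(local: str) -> bool:
--     """
--     Detects addresses like:
--     - admin@example.com
--     - support@example.com
--     - info+abc@example.com
--     """
--     lp = (local or "").lower()
--
--     for kw in ROLE_ACCOUNT_KEYWORDS: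
--         # Exact match (most important)
--         if lp == kw:
--             return True
--
--         # Variants: support+tag, admin.test, info-xyz
--         if lp.startswith(f"{kw}+") or lp.startswith(f"{kw}.") or lp.startswith(f"{kw}-"):
--             return True
--
--         # Partial match for short variants (admin1, abuse2)
--         if lp.startswith(kw) and len(lp) <= len(kw) + 2:
--             return True
--
--     return False
-- ===== SOURCE B (Python) =====
-- ROLE_ACCOUNT_KEYWORDS = [
--     "admin", "administrator", "postmaster", "root",
--     "abuse", "support", "helpdesk", "info", "sales",
--     "billing", "contact", "office", "team",
--     "no-reply", "noreply", "donotreply",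
-- ]
--
-- ROLE_SET = frozenset(ROLE_ACCOUNT_KEYWORDS)
-- _SEPARATORS = "+.-"
--
--
-- def _is_role_account(local: str) -> bool:
--     # Invert the keyword scan: derive candidate prefixes of lp and test set membership.
--     lp = (local or "").lower()
--     n = len(lp)
--     # Exact match or short variant (keyword plus at most two trailing characters):
--     # the keyword would be lp[:L] for some L with n - 2 <= L <= n.
--     if any(lp[:L] in ROLE_SET for L in range(max(n - 2, 0), n + 1)):
--         return True
--     # Separator variant: keyword followed by '+', '.' or '-' at some position.
--     return any(lp[:i] in ROLE_SET for i, c in enumerate(lp) if c in _SEPARATORS)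
-- ===== Notes on version B (the rewrite author's own statement) =====
-- stated objective: alternative
-- what changed: Instead of scanning all 16 keywords and testing four prefix patterns per keyword, B builds a frozenset of the keywords once and inverts the scan: it derives the candidate prefixes of the input itself (lengths n, n-1, n-2 for the exact/short-variant rule, and each prefix ending at a '+'/'.'/'-' separator) and tests set membership.
import Mathlib
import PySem

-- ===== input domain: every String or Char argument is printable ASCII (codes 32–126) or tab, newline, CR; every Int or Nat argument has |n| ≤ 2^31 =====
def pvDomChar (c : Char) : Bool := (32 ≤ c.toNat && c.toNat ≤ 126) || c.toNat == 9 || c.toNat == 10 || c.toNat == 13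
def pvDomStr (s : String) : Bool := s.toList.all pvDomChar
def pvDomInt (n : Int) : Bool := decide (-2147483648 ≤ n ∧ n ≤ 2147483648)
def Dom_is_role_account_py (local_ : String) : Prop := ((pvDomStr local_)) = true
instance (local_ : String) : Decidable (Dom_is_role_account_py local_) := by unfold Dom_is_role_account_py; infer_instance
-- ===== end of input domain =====

-- B replaces A's scan over all 16 keywords (four prefix tests each) by one keyword set and a
-- scan over the input's own candidate prefixes (objective: alternative decomposition).

-- ===== PORT A =====
def pvRoleKeywords : List String :=
  ["admin", "administrator", "postmaster", "root",
   "abuse", "support", "helpdesk", "info", "sales",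
   "billing", "contact", "office", "team",
   "no-reply", "noreply", "donotreply"]

-- `(local or "")` is `local` itself for a str argument (the empty string is the only falsy str)
def is_role_account_py (local_ : String) : Bool :=
  let lp := PySem.Str.lower local_
  pvRoleKeywords.any (fun kw =>
    (lp == kw)
    || (PySem.Str.startswith lp (kw ++ "+") || PySem.Str.startswith lp (kw ++ ".")
        || PySem.Str.startswith lp (kw ++ "-"))
    || (PySem.Str.startswith lp kw && decide (PySem.Str.len lp ≤ PySem.Str.len kw + 2)))

-- ===== PORT B =====
def pvRoleSet : PySem.Set String := PySem.Set.ofList pvRoleKeywords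

-- "+.-"; `c in _SEPARATORS` for a single character c is membership in the character list (exact)
def pvSeparators : List Char := ['+', '.', '-']

def is_role_account_py_alt (local_ : String) : Bool :=
  let lp := PySem.Str.lower local_
  let n := PySem.Str.len lp
  if (PySem.List.pyRange (max (n - 2) 0) (n + 1)).any
      (fun L => PySem.Set.contains pvRoleSet (PySem.Str.slice lp none (some L))) then
    true
  else
    (PySem.List.enumerate lp.toList).any (fun p =>
      pvSeparators.contains p.2
        && PySem.Set.contains pvRoleSet (PySem.Str.slice lp none (some p.1)))

-- ===== PRECONDITION & SPEC =====
def Spec_is_role_account_py (local_ : String) (out : Bool) : Prop := out = is_role_account_py_alt local_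
instance (local_ : String) (out : Bool) : Decidable (Spec_is_role_account_py local_ out) := by unfold Spec_is_role_account_py; infer_instance

-- ===== CLAIM (what is proved, stated in full; the proofs are below) =====
def Claim_equal_is_role_account_py : Prop := ∀ (local_ : String), Dom_is_role_account_py local_ → Spec_is_role_account_py local_ (is_role_account_py local_)

-- ===== LEMMAS AND PROOFS =====

-- The common characterisation both programs compute: some keyword is a prefix of lp and either
-- lp is at most two characters longer, or a separator follows the keyword.
def pvRoleSpec (l : List Char) : Prop :=
  ∃ kw ∈ pvRoleKeywords, kw.toList <+: l ∧
    (l.length ≤ kw.toList.length + 2 ∨ ∃ c ∈ pvSeparators, kw.toList ++ [c] <+: l)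

lemma pv_mem_roleSet (s : String) :
    PySem.Set.contains pvRoleSet s = true ↔ s ∈ pvRoleKeywords := by
  simp [PySem.Set.contains, pvRoleSet, PySem.Set.mem_ofList]

lemma pv_slice_toList (lp : String) (L : Int) (hL : 0 ≤ L) :
    (PySem.Str.slice lp none (some L)).toList = lp.toList.take L.toNat := by
  rw [PySem.Str.toList_slice, PySem.Chars.slice_eq_listSlice, PySem.List.slice_to _ hL]

lemma pv_condA_iff (kw lp : String) :
    ((lp == kw)
      || (PySem.Str.startswith lp (kw ++ "+") || PySem.Str.startswith lp (kw ++ ".")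
          || PySem.Str.startswith lp (kw ++ "-"))
      || (PySem.Str.startswith lp kw && decide (PySem.Str.len lp ≤ PySem.Str.len kw + 2))) = true
    ↔ kw.toList <+: lp.toList ∧
        (lp.toList.length ≤ kw.toList.length + 2
          ∨ ∃ c ∈ pvSeparators, kw.toList ++ [c] <+: lp.toList) := by
  have hsw : ∀ s t : String, (PySem.Str.startswith s t = true) ↔ t.toList <+: s.toList := by
    intro s t; rw [PySem.Str.startswith_eq, PySem.Chars.startswith_iff]
  have hplus : ((kw ++ "+" : String)).toList = kw.toList ++ ['+'] := by simp
  have hdot : ((kw ++ "." : String)).toList = kw.toList ++ ['.'] := by simp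
  have hdash : ((kw ++ "-" : String)).toList = kw.toList ++ ['-'] := by simp
  simp only [Bool.or_eq_true, Bool.and_eq_true, beq_iff_eq, decide_eq_true_eq, hsw,
    hplus, hdot, hdash, PySem.Str.len_eq]
  constructor
  · rintro ((h | (h | h) | h) | ⟨hp, hlen⟩)
    · subst h
      exact ⟨List.prefix_refl _, Or.inl (by omega)⟩
    · exact ⟨(List.prefix_append _ _).trans h, Or.inr ⟨'+', by simp [pvSeparators], h⟩⟩
    · exact ⟨(List.prefix_append _ _).trans h, Or.inr ⟨'.', by simp [pvSeparators], h⟩⟩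
    · exact ⟨(List.prefix_append _ _).trans h, Or.inr ⟨'-', by simp [pvSeparators], h⟩⟩
    · exact ⟨hp, Or.inl (by omega)⟩
  · rintro ⟨hp, hlen | ⟨c, hc, hcp⟩⟩
    · exact Or.inr ⟨hp, by omega⟩
    · simp only [pvSeparators, List.mem_cons, List.not_mem_nil, or_false] at hc
      rcases hc with rfl | rfl | rfl
      · exact Or.inl (Or.inr (Or.inl (Or.inl hcp)))
      · exact Or.inl (Or.inr (Or.inl (Or.inr hcp)))
      · exact Or.inl (Or.inr (Or.inr hcp))

lemma pv_A_iff (lp : String) :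
    (pvRoleKeywords.any (fun kw =>
      (lp == kw)
      || (PySem.Str.startswith lp (kw ++ "+") || PySem.Str.startswith lp (kw ++ ".")
          || PySem.Str.startswith lp (kw ++ "-"))
      || (PySem.Str.startswith lp kw && decide (PySem.Str.len lp ≤ PySem.Str.len kw + 2)))) = true
    ↔ pvRoleSpec lp.toList := by
  rw [List.any_eq_true]
  exact exists_congr fun kw => and_congr_right fun _ => pv_condA_iff kw lp

lemma pv_B1_iff (lp : String) :
    ((PySem.List.pyRange (max (PySem.Str.len lp - 2) 0) (PySem.Str.len lp + 1)).any
      (fun L => PySem.Set.contains pvRoleSet (PySem.Str.slice lp none (some L)))) = true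
    ↔ ∃ kw ∈ pvRoleKeywords, kw.toList <+: lp.toList ∧
        lp.toList.length ≤ kw.toList.length + 2 := by
  rw [List.any_eq_true]
  constructor
  · rintro ⟨L, hL, hc⟩
    rw [PySem.List.mem_pyRange_one, PySem.Str.len_eq] at hL
    have hL0 : 0 ≤ L := le_trans (le_max_right _ _) hL.1
    refine ⟨PySem.Str.slice lp none (some L), (pv_mem_roleSet _).mp hc, ?_, ?_⟩
    · rw [pv_slice_toList lp L hL0]; exact List.take_prefix _ _
    · rw [pv_slice_toList lp L hL0, List.length_take]
      omega
  · rintro ⟨kw, hkw, hp, hlen⟩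
    have hle : kw.toList.length ≤ lp.toList.length := hp.length_le
    refine ⟨(kw.toList.length : Int), ?_, ?_⟩
    · rw [PySem.List.mem_pyRange_one, PySem.Str.len_eq]
      omega
    · rw [pv_mem_roleSet]
      have : PySem.Str.slice lp none (some (kw.toList.length : Int)) = kw := by
        apply String.toList_inj.mp
        rw [pv_slice_toList lp _ (by omega), Int.toNat_natCast]
        exact (List.prefix_iff_eq_take.mp hp).symm
      rw [this]; exact hkw

lemma pv_B2_iff (lp : String) :
    ((PySem.List.enumerate lp.toList).any (fun p =>
      pvSeparators.contains p.2
        && PySem.Set.contains pvRoleSet (PySem.Str.slice lp none (some p.1)))) = true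
    ↔ ∃ kw ∈ pvRoleKeywords, ∃ c ∈ pvSeparators, kw.toList ++ [c] <+: lp.toList := by
  rw [PySem.List.enumerate_eq_zipIdx_map, List.any_map, List.any_eq_true]
  constructor
  · rintro ⟨⟨c, i⟩, hmem, hcond⟩
    simp only [Function.comp, zero_add, Bool.and_eq_true] at hcond
    obtain ⟨hsep, hc⟩ := hcond
    have hget : lp.toList[i]? = some c := List.mk_mem_zipIdx_iff_getElem?.mp hmem
    have hi : i < lp.toList.length := by
      have := List.getElem?_eq_some_iff.mp hget; exact this.1
    have hgc : lp.toList[i] = c := by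
      have := List.getElem?_eq_some_iff.mp hget; exact this.2
    refine ⟨PySem.Str.slice lp none (some (i : Int)), (pv_mem_roleSet _).mp hc, c,
      by simpa using hsep, ?_⟩
    rw [pv_slice_toList lp _ (by omega), Int.toNat_natCast, ← hgc,
      List.take_append_getElem hi]
    exact List.take_prefix _ _
  · rintro ⟨kw, hkw, c, hsep, hpre⟩
    have hlen : kw.toList.length + 1 ≤ lp.toList.length := by
      have := hpre.length_le; simpa using this
    have hi : kw.toList.length < lp.toList.length := by omega
    have hgc : lp.toList[kw.toList.length] = c := by
      have h1 : (kw.toList ++ [c])[kw.toList.length]'(by simp) = c := by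
        simp
      have h2 := hpre.getElem (i := kw.toList.length) (by simp)
      rw [h1] at h2; exact h2.symm
    refine ⟨(c, kw.toList.length), List.mk_mem_zipIdx_iff_getElem?.mpr ?_, ?_⟩
    · rw [List.getElem?_eq_getElem hi, hgc]
    · simp only [Function.comp, zero_add, Bool.and_eq_true]
      constructor
      · simpa using hsep
      · rw [pv_mem_roleSet]
        have : PySem.Str.slice lp none (some (kw.toList.length : Int)) = kw := by
          apply String.toList_inj.mp
          rw [pv_slice_toList lp _ (by omega), Int.toNat_natCast]
          have hp : kw.toList <+: lp.toList := (List.prefix_append _ _).trans hpre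
          exact (List.prefix_iff_eq_take.mp hp).symm
        rw [this]; exact hkw

lemma pv_main (lp : String) :
    (pvRoleKeywords.any (fun kw =>
      (lp == kw)
      || (PySem.Str.startswith lp (kw ++ "+") || PySem.Str.startswith lp (kw ++ ".")
          || PySem.Str.startswith lp (kw ++ "-"))
      || (PySem.Str.startswith lp kw && decide (PySem.Str.len lp ≤ PySem.Str.len kw + 2))))
    = (if (PySem.List.pyRange (max (PySem.Str.len lp - 2) 0) (PySem.Str.len lp + 1)).any
          (fun L => PySem.Set.contains pvRoleSet (PySem.Str.slice lp none (some L))) then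
        true
      else
        (PySem.List.enumerate lp.toList).any (fun p =>
          pvSeparators.contains p.2
            && PySem.Set.contains pvRoleSet (PySem.Str.slice lp none (some p.1)))) := by
  rw [Bool.eq_iff_iff, pv_A_iff]
  rw [show ∀ b c : Bool, ((if b = true then true else c) = true ↔ (b || c) = true) from
    by intro b c; cases b <;> simp]
  rw [Bool.or_eq_true, pv_B1_iff, pv_B2_iff]
  unfold pvRoleSpec
  constructor
  · rintro ⟨kw, hkw, hp, hlen | ⟨c, hc, hcp⟩⟩
    · exact Or.inl ⟨kw, hkw, hp, hlen⟩
    · exact Or.inr ⟨kw, hkw, c, hc, hcp⟩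
  · rintro (⟨kw, hkw, hp, hlen⟩ | ⟨kw, hkw, c, hc, hcp⟩)
    · exact ⟨kw, hkw, hp, Or.inl hlen⟩
    · exact ⟨kw, hkw, (List.prefix_append _ _).trans hcp, Or.inr ⟨c, hc, hcp⟩⟩

-- ===== VERDICT (by name: the statement is the Claim_ definition above) =====
theorem is_role_account_py_spec : Claim_equal_is_role_account_py := by
  intro local_ _
  unfold Spec_is_role_account_py is_role_account_py is_role_account_py_alt
  exact pv_main (PySem.Str.lower local_)
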